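-- pv_equiv track=rewrite | github.com/winslowgeorgos/choice-reconciliation-checker | pages/fx_reconcilliation_app_page.py | resolve_amount_column
-- ===== SOURCE A (Python) =====
-- def resolve_amount_column(columns, operation):
--     """Identifies the amount column based on the operation (credit/debit)."""
--     columns_lower = [col.lower() for col in columns]
--     if operation.lower() == 'credit':
--         candidates = ['credit', 'deposit', 'amount']
--     elif operation.lower() == 'debit':
--         candidates = ['debit', 'withdrawal', 'amount']
--     else:
--         candidates = ['amount', 'value', 'credit', 'deposit', 'debit', 'withdrawal'] # Fallback for general amount
--
--     for key in candidates:
--         if key in columns_lower: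
--             return columns[columns_lower.index(key)]
--     return None
-- ===== SOURCE B (Python) =====
-- def resolve_amount_column(columns, operation):
--     """Identifies the amount column based on the operation (credit/debit).
--
--     Single pass over columns against a prebuilt keyword->priority table."""
--     op = operation.lower()
--     if op == 'credit':
--         candidates = ['credit', 'deposit', 'amount']
--     elif op == 'debit':
--         candidates = ['debit', 'withdrawal', 'amount']
--     else:
--         candidates = ['amount', 'value', 'credit', 'deposit', 'debit', 'withdrawal']
--     rank = {k: i for i, k in enumerate(candidates)}
--     best = None
--     best_rank = len(candidates)
--     for col in columns:
--         r = rank.get(col.lower())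
--         if r is not None and r < best_rank:
--             best, best_rank = col, r
--     return best
-- ===== Notes on version B (the rewrite author's own statement) =====
-- stated objective: alternative
-- what changed: Replaces the candidate-loop with membership test plus list.index rescans by a prebuilt keyword->priority dict and a single pass over columns keeping the minimum-rank (ties: earliest) column.
import Mathlib
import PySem

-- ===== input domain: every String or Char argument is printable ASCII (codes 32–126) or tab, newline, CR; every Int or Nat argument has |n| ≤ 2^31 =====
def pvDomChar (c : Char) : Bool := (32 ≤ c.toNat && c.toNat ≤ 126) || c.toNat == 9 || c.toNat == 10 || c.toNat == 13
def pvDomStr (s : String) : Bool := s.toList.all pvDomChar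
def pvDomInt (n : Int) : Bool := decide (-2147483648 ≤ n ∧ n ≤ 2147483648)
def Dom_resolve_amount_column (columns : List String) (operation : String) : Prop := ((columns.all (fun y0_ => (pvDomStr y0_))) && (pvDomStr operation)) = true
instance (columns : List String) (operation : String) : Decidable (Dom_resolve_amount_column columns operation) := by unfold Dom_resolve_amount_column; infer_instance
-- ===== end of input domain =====

-- B replaces A's candidate loop (membership test + list.index rescan per keyword) by a prebuilt
-- keyword->priority dict and a single pass over columns keeping the minimum-priority column
-- (alternative decomposition; return value proved equal on all inputs).

-- ===== PORT A =====
-- A's 'for key in candidates: if key in columns_lower: return columns[columns_lower.index(key)]'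
def aLoop (columns lowered : List String) : List String → Option String
  | [] => none
  | key :: rest =>
    if lowered.contains key then
      (PySem.List.index? lowered key).bind (fun i => PySem.List.pyGet? columns (Int.ofNat i))
    else aLoop columns lowered rest

def resolve_amount_column (columns : List String) (operation : String) : Option String :=
  let columns_lower := columns.map PySem.Str.lower
  let candidates :=
    if PySem.Str.lower operation = "credit" then ["credit", "deposit", "amount"]
    else if PySem.Str.lower operation = "debit" then ["debit", "withdrawal", "amount"]
    else ["amount", "value", "credit", "deposit", "debit", "withdrawal"]
  aLoop columns columns_lower candidates

-- ===== PORT B =====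
-- B's 'rank = {k: i for i, k in enumerate(candidates)}'
def bRank (candidates : List String) : PySem.Dict String Int :=
  (PySem.List.enumerate candidates).foldl (fun d p => d.insert p.2 p.1) PySem.Dict.empty

-- B's 'for col in columns' loop over the state (best, best_rank)
def bScan (rank : PySem.Dict String Int) (columns : List String)
    (st : Option String × Int) : Option String × Int :=
  columns.foldl (fun st col =>
    match rank.get? (PySem.Str.lower col) with
    | some r => if r < st.2 then (some col, r) else st
    | none => st) st

def resolve_amount_column_alt (columns : List String) (operation : String) : Option String :=
  let op := PySem.Str.lower operation
  let candidates :=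
    if op = "credit" then ["credit", "deposit", "amount"]
    else if op = "debit" then ["debit", "withdrawal", "amount"]
    else ["amount", "value", "credit", "deposit", "debit", "withdrawal"]
  (bScan (bRank candidates) columns (none, (candidates.length : Int))).1

-- ===== PRECONDITION & SPEC =====
def Spec_resolve_amount_column (columns : List String) (operation : String) (out : Option String) : Prop := out = resolve_amount_column_alt columns operation
instance (columns : List String) (operation : String) (out : Option String) : Decidable (Spec_resolve_amount_column columns operation out) := by unfold Spec_resolve_amount_column; infer_instance

-- ===== CLAIM (what is proved, stated in full; the proofs are below) =====
def Claim_equal_resolve_amount_column : Prop := ∀ (columns : List String) (operation : String), Dom_resolve_amount_column columns operation → Spec_resolve_amount_column columns operation (resolve_amount_column columns operation)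

-- ===== LEMMAS AND PROOFS =====

-- Common specification both loops are reduced to: the first candidate keyword some column
-- lowers to, resolved to the first such column.
def pvSpec (cands cols : List String) : Option String :=
  (cands.filterMap (fun k => cols.find? (fun c => PySem.Str.lower c == k))).head?

-- B's scan, abstracted over the rank-lookup function
def pvStep (R : String → Option Int) (st : Option String × Int) (col : String) : Option String × Int :=
  match R (PySem.Str.lower col) with
  | some r => if r < st.2 then (some col, r) else st
  | none => st

def pvScan (R : String → Option Int) (cols : List String) (st : Option String × Int) :
    Option String × Int :=
  cols.foldl (pvStep R) st

-- the rank function B's dict realises: position of s in the candidate list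
def pvRank (cands : List String) (s : String) : Option Int :=
  (PySem.List.index? cands s).map (fun i => (i : Int))

theorem get?_bRank_aux (cands : List String) : ∀ (j : Int) (d : PySem.Dict String Int),
    cands.Nodup → ∀ s,
    ((PySem.List.enumerate cands j).foldl (fun d p => d.insert p.2 p.1) d).get? s =
      match PySem.List.index? cands s with
      | some i => some (j + i)
      | none => d.get? s := by
  induction cands with
  | nil => intro j d _ s; simp [PySem.List.enumerate, PySem.List.index?_eq_idxOf?, List.idxOf?]
  | cons c cs ih =>
    intro j d hnd s
    rw [PySem.List.enumerate_cons]
    simp only [List.foldl_cons]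
    rw [ih (j+1) (d.insert c j) hnd.of_cons s]
    by_cases hs : s = c
    · subst hs
      have h1 : PySem.List.index? cs s = none := by
        rw [PySem.List.index?_eq_none_iff]; exact (List.nodup_cons.mp hnd).1
      rw [h1, PySem.List.index?_cons_self]
      simp [PySem.Dict.get?_insert_self]
    · have h2 : PySem.List.index? (c :: cs) s = (PySem.List.index? cs s).map (· + 1) :=
        PySem.List.index?_cons_of_ne cs (show c ≠ s from fun h => hs h.symm)
      rw [h2]
      cases h3 : PySem.List.index? cs s with
      | none => simp [PySem.Dict.get?_insert_of_ne _ _ hs]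
      | some i => simp; ring

theorem get?_bRank (cands : List String) (h : cands.Nodup) (s : String) :
    (bRank cands).get? s = pvRank cands s := by
  unfold bRank pvRank
  rw [get?_bRank_aux cands 0 PySem.Dict.empty h s]
  cases h3 : PySem.List.index? cands s with
  | none => simp [PySem.Dict.get?_empty]
  | some i => simp

theorem bScan_eq_pvScan (cands : List String) (h : cands.Nodup) (cols : List String)
    (st : Option String × Int) : bScan (bRank cands) cols st = pvScan (pvRank cands) cols st := by
  unfold bScan pvScan
  have : (fun (st : Option String × Int) (col : String) =>
      match (bRank cands).get? (PySem.Str.lower col) with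
      | some r => if r < st.2 then (some col, r) else st
      | none => st) = pvStep (pvRank cands) := by
    funext st col
    rw [pvStep, get?_bRank cands h]
  rw [this]

theorem pvScan_stop (R : String → Option Int) (hnn : ∀ s r, R s = some r → 0 ≤ r) :
    ∀ (cols : List String) (b : Option String), pvScan R cols (b, 0) = (b, 0) := by
  intro cols
  induction cols with
  | nil => intro b; rfl
  | cons c cs ih =>
    intro b
    show pvScan R cs (pvStep R (b, 0) c) = (b, 0)
    have : pvStep R (b, 0) c = (b, 0) := by
      unfold pvStep
      cases hr : R (PySem.Str.lower c) with
      | none => rfl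
      | some r => have := hnn _ _ hr; simp; omega
    rw [this, ih]

theorem pvScan_hit (R : String → Option Int) (k : String)
    (hnn : ∀ s r, R s = some r → 0 ≤ r) (hz : ∀ s, R s = some 0 ↔ s = k) :
    ∀ (cols : List String) (b : Option String) (m : Int) (c0 : String), 1 ≤ m →
      cols.find? (fun c => PySem.Str.lower c == k) = some c0 →
      (pvScan R cols (b, m)).1 = some c0 := by
  intro cols
  induction cols with
  | nil => intro b m c0 _ hf; simp at hf
  | cons c cs ih =>
    intro b m c0 hm hf
    show (pvScan R cs (pvStep R (b, m) c)).1 = some c0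
    by_cases hk : PySem.Str.lower c = k
    · have hc0 : c0 = c := by
        rw [List.find?_cons_of_pos (by simp [hk])] at hf
        exact (Option.some_inj.mp hf).symm
      have hr : R (PySem.Str.lower c) = some 0 := (hz _).mpr hk
      have hstep : pvStep R (b, m) c = (some c, 0) := by
        unfold pvStep; rw [hr]; simp; omega
      rw [hstep, pvScan_stop R hnn, hc0]
    · rw [List.find?_cons_of_neg (by simp [hk])] at hf
      unfold pvStep
      cases hr : R (PySem.Str.lower c) with
      | none => exact ih b m c0 hm hf
      | some r =>
        have h0 : 0 ≤ r := hnn _ _ hr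
        have hne : r ≠ 0 := fun h => hk ((hz _).mp (h ▸ hr))
        simp only []
        by_cases hlt : r < m
        · rw [if_pos hlt]; exact ih (some c) r c0 (by omega) hf
        · rw [if_neg hlt]; exact ih b m c0 hm hf

theorem pvScan_shift (R R' : String → Option Int) :
    ∀ (cols : List String) (b : Option String) (m : Int),
      (∀ c ∈ cols, R' (PySem.Str.lower c) = (R (PySem.Str.lower c)).map (· + 1)) →
      pvScan R' cols (b, m + 1) = ((pvScan R cols (b, m)).1, (pvScan R cols (b, m)).2 + 1) := by
  intro cols
  induction cols with
  | nil => intro b m _; rfl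
  | cons c cs ih =>
    intro b m hR
    have hc := hR c (List.mem_cons_self ..)
    show pvScan R' cs (pvStep R' (b, m + 1) c) =
      ((pvScan R cs (pvStep R (b, m) c)).1, (pvScan R cs (pvStep R (b, m) c)).2 + 1)
    have hrest : ∀ x ∈ cs, R' (PySem.Str.lower x) = (R (PySem.Str.lower x)).map (· + 1) :=
      fun x hx => hR x (List.mem_cons_of_mem _ hx)
    cases hr : R (PySem.Str.lower c) with
    | none =>
      have : pvStep R' (b, m + 1) c = (b, m + 1) := by unfold pvStep; rw [hc, hr]; rfl
      rw [this, ih b m hrest]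
      unfold pvStep; rw [hr]
    | some r =>
      have hst : pvStep R (b, m) c = if r < m then (some c, r) else (b, m) := by
        unfold pvStep; rw [hr]
      have hst' : pvStep R' (b, m + 1) c = if r < m then (some c, r + 1) else (b, m + 1) := by
        unfold pvStep; rw [hc, hr]
        simp only [Option.map_some]
        by_cases hlt : r < m
        · rw [if_pos (by omega), if_pos hlt]
        · rw [if_neg (by omega), if_neg hlt]
      by_cases hlt : r < m
      · rw [hst, hst', if_pos hlt, if_pos hlt, ih (some c) r hrest]
      · rw [hst, hst', if_neg hlt, if_neg hlt, ih b m hrest]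

theorem pvRank_nonneg (cands : List String) : ∀ s r, pvRank cands s = some r → 0 ≤ r := by
  intro s r h
  unfold pvRank at h
  cases h3 : PySem.List.index? cands s with
  | none => rw [h3] at h; simp at h
  | some i => rw [h3] at h; simp at h; omega

theorem pvScan_spec (cands : List String) (h : cands.Nodup) (cols : List String) :
    (pvScan (pvRank cands) cols (none, (cands.length : Int))).1 = pvSpec cands cols := by
  induction cands generalizing cols with
  | nil =>
    rw [show ((List.length ([] : List String) : Int)) = 0 by simp,
      pvScan_stop _ (pvRank_nonneg [])]
    rfl
  | cons k cs ih =>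
    cases hf : cols.find? (fun c => PySem.Str.lower c == k) with
    | some c0 =>
      rw [pvScan_hit (pvRank (k :: cs)) k (pvRank_nonneg _) ?_ cols none _ c0 (by simp) hf]
      · unfold pvSpec
        rw [List.filterMap_cons, hf]
        rfl
      · intro s
        unfold pvRank
        by_cases hs : s = k
        · subst hs; rw [PySem.List.index?_cons_self]; simp
        · rw [PySem.List.index?_cons_of_ne cs (show k ≠ s from fun h => hs h.symm)]
          cases h3 : PySem.List.index? cs s with
          | none => simp [hs]
          | some i => simp [hs]; omega
    | none =>
      have hnone : ∀ c ∈ cols, PySem.Str.lower c ≠ k := by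
        intro c hc
        have := List.find?_eq_none.mp hf c hc
        simpa using this
      have hshape : (List.length (k :: cs) : Int) = (cs.length : Int) + 1 := by simp
      rw [hshape, pvScan_shift (pvRank cs) (pvRank (k :: cs)) cols none (cs.length : Int) ?_]
      · rw [ih h.of_cons cols]
        unfold pvSpec
        rw [List.filterMap_cons, hf]
      · intro c hc
        unfold pvRank
        rw [PySem.List.index?_cons_of_ne cs (show k ≠ PySem.Str.lower c from
          fun hh => hnone c hc hh.symm)]
        cases h3 : PySem.List.index? cs (PySem.Str.lower c) with
        | none => simp
        | some i => simp

theorem idx_find (k : String) : ∀ (cols : List String),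
    (PySem.List.index? (cols.map PySem.Str.lower) k).bind
      (fun i => PySem.List.pyGet? cols (Int.ofNat i)) =
    cols.find? (fun c => PySem.Str.lower c == k) := by
  intro cols
  induction cols with
  | nil => simp [PySem.List.index?_eq_idxOf?, List.idxOf?]
  | cons c cs ih =>
    rw [List.map_cons]
    by_cases h : PySem.Str.lower c = k
    · rw [h, PySem.List.index?_cons_self, List.find?_cons_of_pos (by simp [h])]
      simp [PySem.List.pyGet?, PySem.List.pyIdx?]
    · rw [PySem.List.index?_cons_of_ne (cs.map PySem.Str.lower) h,
        List.find?_cons_of_neg (by simp [h]), ← ih]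
      cases h3 : PySem.List.index? (cs.map PySem.Str.lower) k with
      | none => simp
      | some i =>
        simp only [Option.map_some, Option.bind_some]
        have : PySem.List.pyGet? (c :: cs) (Int.ofNat (i + 1)) =
            PySem.List.pyGet? cs (Int.ofNat i) := by
          rw [show Int.ofNat (i+1) = ((i+1 : Nat) : Int) from rfl,
            show Int.ofNat i = ((i : Nat) : Int) from rfl,
            PySem.List.pyGet?_natCast, PySem.List.pyGet?_natCast]
          simp
        rw [this]

theorem aLoop_spec (cols : List String) : ∀ (cands : List String),
    aLoop cols (cols.map PySem.Str.lower) cands = pvSpec cands cols := by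
  intro cands
  induction cands with
  | nil => rfl
  | cons k rest ih =>
    unfold aLoop pvSpec
    by_cases hc : (cols.map PySem.Str.lower).contains k
    · rw [if_pos hc, idx_find]
      have hmem : k ∈ cols.map PySem.Str.lower := by simpa using hc
      obtain ⟨c, hcmem, hck⟩ := List.mem_map.mp hmem
      have hsome : (cols.find? (fun c => PySem.Str.lower c == k)).isSome := by
        rw [List.find?_isSome]
        exact ⟨c, hcmem, by simp [hck]⟩
      obtain ⟨c0, hc0⟩ := Option.isSome_iff_exists.mp hsome
      rw [hc0, List.filterMap_cons, hc0]
      rfl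
    · rw [if_neg hc]
      have hnone : cols.find? (fun c => PySem.Str.lower c == k) = none := by
        rw [List.find?_eq_none]
        intro c hcm
        simp only [beq_iff_eq]
        intro hck
        exact hc (by simp; exact ⟨c, hcm, hck⟩)
      rw [List.filterMap_cons, hnone, ih]
      rfl

theorem ports_agree (columns : List String) (operation : String) :
    resolve_amount_column columns operation = resolve_amount_column_alt columns operation := by
  unfold resolve_amount_column resolve_amount_column_alt
  simp only []
  split_ifs with h1 h2 <;>
    rw [bScan_eq_pvScan _ (by decide), pvScan_spec _ (by decide), aLoop_spec]

-- ===== VERDICT (by name: the statement is the Claim_ definition above) =====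
theorem resolve_amount_column_spec : Claim_equal_resolve_amount_column := by
  intro columns operation _
  exact ports_agree columns operation
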